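-- pv_equiv track=rewrite | github.com/ChanaWerblowsky/Celestial_Bodies | DateConversion.py | molad_determination
-- ===== SOURCE A (Python) =====
-- LEAP_YEARS = {3, 6, 8, 11, 14, 17, 19}
--
-- def time_multiplication(time_tuple, factor, acc_days=False):
--
--     # unpack time tuple
--     days, hours, chalakim = time_tuple
--
--     # total number of chalakim when time tuple is multiplied by given factor
--     chalakim = factor * ((days * 24 * 1080) + (hours * 1080) + chalakim)
--
--     # carry chalakim in excess of 1079
--     hours = chalakim // 1080
--     chalakim %= 1080
--
--     # carry hours in excess of 23
--     days = hours // 24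
--     hours %= 24
--
--     # disregard days of complete weeks
--     if not acc_days: days %= 7
--
--     return days, hours, chalakim
--
-- def time_addition(tuple1, tuple2, acc_days=False):
--
--     # unpack time tuples
--     d1, h1, p1 = tuple1
--     d2, h2, p2 = tuple2
--
--     chalakim = p1 + p2
--     hours = h1 + h2
--     days = d1 + d2
--
--     hours += chalakim // 1080
--     chalakim %= 1080
--
--     days += hours // 24
--     hours %= 24
--
--     if not acc_days: days %= 7
--
--     return days, hours, chalakim
--
-- def molad_determination(month, year, acc_days=False):
--
--     molad_tohu = (1, 5, 204)   # 2d 5h 204p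
--     month_len = (29, 12, 793)  # 29d 12h 793p
--
--     # First, determine number of months that have passed since Creation
--
--     # number of complete 19-year cycles
--     lunar_cycles = (year-1) // 19
--
--     # total number of months in those complete cycles
--     months = (lunar_cycles * ((12 * 12) + (7 * 13)))
--
--     # complete years remaining in excess of complete cycles
--     remaining_years = (year-1) % 19
--
--     # months from the remaining complete years (# of months per year depends on type of year)
--     for i in range(remaining_years):  # for each remaining year
--         if i + 1 in LEAP_YEARS:       # if it's a leap year,
--             months += 13              # add 13 months to month-count
--
--         else:
--             months += 12             # add 12 months otherwise
--
--     # months from current (possibly incomplete) year (up until month in question)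
--     months += month-1
--
--     # Once know how many months have passed, multiply that # by the length of a month
--     # to determine how much the molad has advanced since molad tohu
--     molad_advancement = time_multiplication(month_len, months, acc_days)
--
--     # Finally, add the molad's advancement to molad tohu to determine current molad
--     molad = time_addition(molad_tohu, molad_advancement, acc_days)
--
--     return molad
-- ===== SOURCE B (Python) =====
-- LEAP_YEARS = {3, 6, 8, 11, 14, 17, 19}
--
-- def molad_determination(month, year, acc_days=False):
--     # closed-form month count since Creation
--     lunar_cycles = (year - 1) // 19
--     remaining = (year - 1) % 19
--     months = 12 * (year - 1) + 7 * lunar_cycles \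
--         + sum(1 for y in LEAP_YEARS if y <= remaining) + (month - 1)
--     # total chalakim: molad tohu (1d 5h 204p) + months * month length (29d 12h 793p)
--     total = 31524 + months * 765433
--     days = total // 25920
--     hours = (total // 1080) % 24
--     chalakim = total % 1080
--     if not acc_days:
--         days %= 7
--     return days, hours, chalakim
-- ===== Notes on version B (the rewrite author's own statement) =====
-- stated objective: alternative
-- what changed: B replaces A's per-year leap loop with a closed-form month count (12*(year-1) + 7*cycles + count of leap indices <= remainder) and replaces A's staged time_multiplication/time_addition tuple pipeline with a single total-chalakim sum normalized once by one //,% carry chain.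
import Mathlib
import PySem

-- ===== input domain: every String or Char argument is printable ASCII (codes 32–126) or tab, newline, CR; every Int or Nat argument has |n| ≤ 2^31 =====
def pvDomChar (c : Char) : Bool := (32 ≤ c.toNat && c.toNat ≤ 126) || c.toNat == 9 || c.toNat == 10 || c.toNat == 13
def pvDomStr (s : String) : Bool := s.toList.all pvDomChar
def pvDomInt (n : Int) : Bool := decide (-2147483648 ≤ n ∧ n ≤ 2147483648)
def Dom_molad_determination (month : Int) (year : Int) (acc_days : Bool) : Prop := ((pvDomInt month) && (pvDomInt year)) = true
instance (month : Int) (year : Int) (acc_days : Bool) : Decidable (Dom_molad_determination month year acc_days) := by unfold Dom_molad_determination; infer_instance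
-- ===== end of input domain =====

-- B replaces A's per-year leap loop by a closed-form month count and A's staged
-- time_multiplication/time_addition tuple pipeline by one total-chalakim sum
-- normalized once ('alternative': same cost, different decomposition).

-- ===== PORT A =====
def pvLEAP_YEARS : List Int := [3, 6, 8, 11, 14, 17, 19]

def pvTimeMultiplication (time_tuple : Int × Int × Int) (factor : Int) (acc_days : Bool) : Int × Int × Int :=
  let days := time_tuple.1
  let hours := time_tuple.2.1
  let chalakim := time_tuple.2.2
  let chalakim := factor * ((days * 24 * 1080) + (hours * 1080) + chalakim)
  let hours := PySem.Int.floordiv chalakim 1080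
  let chalakim := PySem.Int.mod chalakim 1080
  let days := PySem.Int.floordiv hours 24
  let hours := PySem.Int.mod hours 24
  let days := if !acc_days then PySem.Int.mod days 7 else days
  (days, hours, chalakim)

def pvTimeAddition (tuple1 : Int × Int × Int) (tuple2 : Int × Int × Int) (acc_days : Bool) : Int × Int × Int :=
  let d1 := tuple1.1; let h1 := tuple1.2.1; let p1 := tuple1.2.2
  let d2 := tuple2.1; let h2 := tuple2.2.1; let p2 := tuple2.2.2
  let chalakim := p1 + p2
  let hours := h1 + h2
  let days := d1 + d2
  let hours := hours + PySem.Int.floordiv chalakim 1080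
  let chalakim := PySem.Int.mod chalakim 1080
  let days := days + PySem.Int.floordiv hours 24
  let hours := PySem.Int.mod hours 24
  let days := if !acc_days then PySem.Int.mod days 7 else days
  (days, hours, chalakim)

def molad_determination (month : Int) (year : Int) (acc_days : Bool) : Int × Int × Int :=
  let molad_tohu : Int × Int × Int := (1, 5, 204)
  let month_len : Int × Int × Int := (29, 12, 793)
  let lunar_cycles := PySem.Int.floordiv (year - 1) 19
  let months := lunar_cycles * ((12 * 12) + (7 * 13))
  let remaining_years := PySem.Int.mod (year - 1) 19
  let months := (PySem.List.pyRange 0 remaining_years 1).foldl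
    (fun months i => if pvLEAP_YEARS.contains (i + 1) then months + 13 else months + 12) months
  let months := months + (month - 1)
  let molad_advancement := pvTimeMultiplication month_len months acc_days
  pvTimeAddition molad_tohu molad_advancement acc_days

-- ===== PORT B =====
def molad_determination_alt (month : Int) (year : Int) (acc_days : Bool) : Int × Int × Int :=
  let lunar_cycles := PySem.Int.floordiv (year - 1) 19
  let remaining := PySem.Int.mod (year - 1) 19
  let months := 12 * (year - 1) + 7 * lunar_cycles
    + (pvLEAP_YEARS.map (fun y => if y ≤ remaining then (1 : Int) else 0)).sum + (month - 1)
  let total := 31524 + months * 765433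
  let days := PySem.Int.floordiv total 25920
  let hours := PySem.Int.mod (PySem.Int.floordiv total 1080) 24
  let chalakim := PySem.Int.mod total 1080
  let days := if !acc_days then PySem.Int.mod days 7 else days
  (days, hours, chalakim)

-- ===== PRECONDITION & SPEC =====
def Spec_molad_determination (month : Int) (year : Int) (acc_days : Bool) (out : Int × Int × Int) : Prop := out = molad_determination_alt month year acc_days
instance (month : Int) (year : Int) (acc_days : Bool) (out : Int × Int × Int) : Decidable (Spec_molad_determination month year acc_days out) := by unfold Spec_molad_determination; infer_instance

-- ===== CLAIM (what is proved, stated in full; the proofs are below) =====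
def Claim_equal_molad_determination : Prop := ∀ (month : Int) (year : Int) (acc_days : Bool), Dom_molad_determination month year acc_days → Spec_molad_determination month year acc_days (molad_determination month year acc_days)

-- ===== LEMMAS AND PROOFS =====

-- A's per-year loop over range(r) equals B's closed form 12*r + #{leap years ≤ r}, for r = (year-1)%19 ∈ [0,19)
theorem pv_fold_shift (l : List Int) (m : Int) :
    l.foldl (fun months i => if pvLEAP_YEARS.contains (i + 1) then months + 13 else months + 12) m
    = m + l.foldl (fun months i => if pvLEAP_YEARS.contains (i + 1) then months + 13 else months + 12) 0 := by
  induction l generalizing m with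
  | nil => simp
  | cons x xs ih =>
    simp only [List.foldl_cons]
    rw [ih, ih (if pvLEAP_YEARS.contains (x + 1) then (0:Int) + 13 else 0 + 12)]
    split_ifs <;> ring

theorem pv_loop_eq (m r : Int) (h0 : 0 ≤ r) (h1 : r < 19) :
    (PySem.List.pyRange 0 r 1).foldl
      (fun months i => if pvLEAP_YEARS.contains (i + 1) then months + 13 else months + 12) m
    = m + 12 * r + (pvLEAP_YEARS.map (fun y => if y ≤ r then (1 : Int) else 0)).sum := by
  rw [pv_fold_shift, add_assoc]
  congr 1
  interval_cases r <;> decide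

-- A's two-stage carry pipeline equals B's single normalization of the total chalakim
theorem pv_normalize_eq (M : Int) (acc : Bool) :
    pvTimeAddition (1, 5, 204) (pvTimeMultiplication (29, 12, 793) M acc) acc
    = (let total := 31524 + M * 765433
       let days := PySem.Int.floordiv total 25920
       let hours := PySem.Int.mod (PySem.Int.floordiv total 1080) 24
       let chalakim := PySem.Int.mod total 1080
       let days := if !acc then PySem.Int.mod days 7 else days
       (days, hours, chalakim)) := by
  cases acc <;>
  · simp only [pvTimeAddition, pvTimeMultiplication, Bool.not_false, Bool.not_true,
      if_true, if_false, Bool.false_eq_true,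
      PySem.Int.floordiv_eq_ediv_of_pos (by norm_num : (0:Int) < 1080),
      PySem.Int.floordiv_eq_ediv_of_pos (by norm_num : (0:Int) < 24),
      PySem.Int.floordiv_eq_ediv_of_pos (by norm_num : (0:Int) < 25920),
      PySem.Int.mod_eq_emod_of_pos (by norm_num : (0:Int) < 1080),
      PySem.Int.mod_eq_emod_of_pos (by norm_num : (0:Int) < 24),
      PySem.Int.mod_eq_emod_of_pos (by norm_num : (0:Int) < 7),
      Prod.mk.injEq]
    rw [show ((29:Int) * 24 * 1080 + 12 * 1080 + 793) = 765433 from by norm_num]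
    generalize M * 765433 = C
    obtain ⟨H, P, rfl, hP0, hP1⟩ : ∃ H P, C = 1080 * H + P ∧ 0 ≤ P ∧ P < 1080 :=
      ⟨C / 1080, C % 1080, by omega, by omega, by omega⟩
    obtain ⟨D, HH, rfl, h0, h1⟩ : ∃ D HH, H = 24 * D + HH ∧ 0 ≤ HH ∧ HH < 24 :=
      ⟨H / 24, H % 24, by omega, by omega, by omega⟩
    rw [show ((1080 * (24 * D + HH) + P) / 1080 : Int) = 24 * D + HH from by omega,
        show ((1080 * (24 * D + HH) + P) % 1080 : Int) = P from by omega]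
    rw [show (((24 : Int) * D + HH) / 24 : Int) = D from by omega,
        show (((24 : Int) * D + HH) % 24 : Int) = HH from by omega]
    refine ⟨?_, ?_, ?_⟩ <;> omega

-- ===== VERDICT (by name: the statement is the Claim_ definition above) =====
theorem molad_determination_spec : Claim_equal_molad_determination := by
  intro month year acc_days _
  unfold Spec_molad_determination molad_determination molad_determination_alt
  have h0 : 0 ≤ PySem.Int.mod (year - 1) 19 := PySem.Int.mod_nonneg _ (by norm_num)
  have h1 : PySem.Int.mod (year - 1) 19 < 19 := PySem.Int.mod_lt _ (by norm_num)
  have hdm := PySem.Int.floordiv_mul_add_mod (year - 1) 19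
  simp only []
  rw [pv_loop_eq _ _ h0 h1, pv_normalize_eq]
  simp only []
  have hm : PySem.Int.floordiv (year - 1) 19 * ((12 * 12) + (7 * 13))
      + 12 * PySem.Int.mod (year - 1) 19
      + (pvLEAP_YEARS.map (fun y => if y ≤ PySem.Int.mod (year - 1) 19 then (1 : Int) else 0)).sum
      + (month - 1)
    = 12 * (year - 1) + 7 * PySem.Int.floordiv (year - 1) 19
      + (pvLEAP_YEARS.map (fun y => if y ≤ PySem.Int.mod (year - 1) 19 then (1 : Int) else 0)).sum
      + (month - 1) := by
    generalize (pvLEAP_YEARS.map (fun y => if y ≤ PySem.Int.mod (year - 1) 19 then (1 : Int) else 0)).sum = S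
    omega
  rw [hm]
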